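-- pv_equiv track=rewrite | github.com/Gerardleo/LFP_S1_2024_PROYECTO1_202200196 | prueba.py | tokenize_input
-- ===== SOURCE A (Python) =====
-- from collections import namedtuple
--
-- Token = namedtuple("Token", ["type", "value"])
--
-- def tokenize_input(input_str):
--     tokens = []
--     input_str = input_str.replace("\n", "").replace("\t", "")
--     i = 0
--     while i < len(input_str):
--         char = input_str[i]
--         if char == "{":
--             tokens.append(Token("LBRACE", char))
--         elif char == "}":
--             tokens.append(Token("RBRACE", char))
--         elif char == ":":
--             tokens.append(Token("COLON", char))
--         elif char == ";":
--             tokens.append(Token("SEMICOLON", char))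
--         elif char.isalpha():
--             value = ""
--             while i < len(input_str) and input_str[i].isalpha():
--                 value += input_str[i]
--                 i += 1
--             tokens.append(Token("WORD", value))
--             continue
--         i += 1
--     return tokens
-- ===== SOURCE B (Python) =====
-- from itertools import groupby
--
-- def tokenize_input(input_str):
--     input_str = input_str.replace("\n", "").replace("\t", "")
--     classify = lambda c: ("LBRACE" if c == "{" else
--                           "RBRACE" if c == "}" else
--                           "COLON" if c == ":" else
--                           "SEMICOLON" if c == ";" else
--                           "WORD" if c.isalpha() else None)
--     tokens = []
--     for kind, run in groupby(input_str, key=classify):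
--         if kind is None:
--             continue
--         if kind == "WORD":
--             tokens.append((kind, "".join(run)))
--         else:
--             tokens.extend((kind, ch) for ch in run)
--     return tokens
-- ===== Notes on version B (the rewrite author's own statement) =====
-- stated objective: idiomatic
-- what changed: Replaces A's index-driven while loop with an inner word-accumulating while by a character classifier plus itertools.groupby over runs of equal class: one WORD token per alpha run, one token per character for special runs, None runs skipped.
import Mathlib
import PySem

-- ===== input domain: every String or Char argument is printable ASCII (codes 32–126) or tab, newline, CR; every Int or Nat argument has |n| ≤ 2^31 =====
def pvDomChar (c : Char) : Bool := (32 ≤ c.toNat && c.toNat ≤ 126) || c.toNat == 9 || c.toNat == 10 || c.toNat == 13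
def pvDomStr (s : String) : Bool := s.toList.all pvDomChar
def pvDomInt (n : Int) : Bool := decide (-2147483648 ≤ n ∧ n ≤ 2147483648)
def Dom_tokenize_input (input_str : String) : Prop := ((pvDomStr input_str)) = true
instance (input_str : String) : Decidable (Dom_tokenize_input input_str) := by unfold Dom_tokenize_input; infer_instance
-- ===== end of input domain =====

-- B replaces A's index-driven while loop (with an inner word-accumulating while) by a
-- classifier + run-wise grouping (itertools.groupby); objective: idiomatic, same cost.

-- ===== PORT A =====
-- A's outer while over characters; the inner `while … value += input_str[i]` accumulates
-- the maximal alpha run (takeWhile) and the outer loop resumes after it (dropWhile).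
def tiLoopA : List Char → List (String × String)
  | [] => []
  | c :: rest =>
    if c = '{' then ("LBRACE", String.ofList [c]) :: tiLoopA rest
    else if c = '}' then ("RBRACE", String.ofList [c]) :: tiLoopA rest
    else if c = ':' then ("COLON", String.ofList [c]) :: tiLoopA rest
    else if c = ';' then ("SEMICOLON", String.ofList [c]) :: tiLoopA rest
    else if PySem.Chars.isalpha c then
      ("WORD", String.ofList ((c :: rest).takeWhile PySem.Chars.isalpha)) ::
        tiLoopA ((c :: rest).dropWhile PySem.Chars.isalpha)
    else tiLoopA rest
  termination_by l => l.length
  decreasing_by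
    · simp
    · simp
    · simp
    · simp
    · simp only [List.dropWhile_cons, *, if_pos]
      have := List.length_dropWhile_le (p := PySem.Chars.isalpha) (l := rest)
      simp; omega
    · simp

def tokenize_input (input_str : String) : List (String × String) :=
  tiLoopA ((PySem.Str.replace (PySem.Str.replace input_str "\n" "") "\t" "")).toList

-- ===== PORT B =====
def classifyB (c : Char) : Option String :=
  if c = '{' then some "LBRACE"
  else if c = '}' then some "RBRACE"
  else if c = ':' then some "COLON"
  else if c = ';' then some "SEMICOLON"
  else if PySem.Chars.isalpha c then some "WORD"
  else none

-- emit for one groupby run: skip None, one WORD token per run, one token per char otherwise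
def emitB : Option String → List Char → List (String × String)
  | none, _ => []
  | some t, run => if t = "WORD" then [(t, String.ofList run)] else run.map fun d => (t, String.ofList [d])

-- groupby: peel one maximal run of equal classification at a time
def tiLoopB : List Char → List (String × String)
  | [] => []
  | c :: rest =>
    emitB (classifyB c) (c :: rest.takeWhile (fun d => classifyB d == classifyB c)) ++
      tiLoopB (rest.dropWhile (fun d => classifyB d == classifyB c))
  termination_by l => l.length
  decreasing_by
    have := List.length_dropWhile_le (p := fun d => classifyB d == classifyB c) (l := rest)
    simp; omega

def tokenize_input_alt (input_str : String) : List (String × String) :=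
  tiLoopB ((PySem.Str.replace (PySem.Str.replace input_str "\n" "") "\t" "")).toList

-- ===== PRECONDITION & SPEC =====
def Spec_tokenize_input (input_str : String) (out : List (String × String)) : Prop := out = tokenize_input_alt input_str
instance (input_str : String) (out : List (String × String)) : Decidable (Spec_tokenize_input input_str out) := by unfold Spec_tokenize_input; infer_instance

-- ===== CLAIM (what is proved, stated in full; the proofs are below) =====
def Claim_equal_tokenize_input : Prop := ∀ (input_str : String), Dom_tokenize_input input_str → Spec_tokenize_input input_str (tokenize_input input_str)

-- ===== LEMMAS AND PROOFS =====

lemma stepA_none {c : Char} (s : List Char) (hc : classifyB c = none) :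
    tiLoopA (c :: s) = tiLoopA s := by
  unfold classifyB at hc
  split_ifs at hc
  rw [tiLoopA]
  simp_all

lemma stepA_special {c : Char} {t : String} (s : List Char)
    (hc : classifyB c = some t) (hw : t ≠ "WORD") :
    tiLoopA (c :: s) = (t, String.ofList [c]) :: tiLoopA s := by
  unfold classifyB at hc
  split_ifs at hc with h1 h2 h3 h4 h5 <;> injection hc with hc <;> subst hc <;> rw [tiLoopA]
  · simp [h1]
  · simp [h2]
  · simp [h3]
  · simp [h4]
  · exact absurd rfl hw

lemma stepA_word {c : Char} (s : List Char) (h : PySem.Chars.isalpha c = true) :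
    tiLoopA (c :: s) =
      ("WORD", String.ofList ((c :: s).takeWhile PySem.Chars.isalpha)) ::
        tiLoopA ((c :: s).dropWhile PySem.Chars.isalpha) := by
  have h1 : c ≠ '{' := by rintro rfl; exact absurd h (by decide)
  have h2 : c ≠ '}' := by rintro rfl; exact absurd h (by decide)
  have h3 : c ≠ ':' := by rintro rfl; exact absurd h (by decide)
  have h4 : c ≠ ';' := by rintro rfl; exact absurd h (by decide)
  rw [tiLoopA]
  simp [h1, h2, h3, h4, h]

lemma classify_word_iff (c : Char) :
    classifyB c = some "WORD" ↔ PySem.Chars.isalpha c = true := by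
  unfold classifyB
  split_ifs with h1 h2 h3 h4 h5
  · subst h1; decide
  · subst h2; decide
  · subst h3; decide
  · subst h4; decide
  · simp [h5]
  · simp [h5]

lemma word_pred (x : Char) :
    (classifyB x == some "WORD") = PySem.Chars.isalpha x := by
  by_cases h : classifyB x = some "WORD"
  · rw [h, (classify_word_iff x).mp h]; rfl
  · have h2 : PySem.Chars.isalpha x = false := by
      cases hb : PySem.Chars.isalpha x
      · rfl
      · exact absurd ((classify_word_iff x).mpr hb) h
    simp [h, h2]

lemma skip_none : ∀ (pre s : List Char), (∀ d ∈ pre, classifyB d = none) →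
    tiLoopA (pre ++ s) = tiLoopA s
  | [], s, _ => rfl
  | d :: pre, s, h => by
    rw [List.cons_append, stepA_none _ (h d (by simp))]
    exact skip_none pre s (fun x hx => h x (by simp [hx]))

lemma skip_special {t : String} (hw : t ≠ "WORD") :
    ∀ (pre s : List Char), (∀ d ∈ pre, classifyB d = some t) →
    tiLoopA (pre ++ s) = pre.map (fun d => (t, String.ofList [d])) ++ tiLoopA s
  | [], s, _ => rfl
  | d :: pre, s, h => by
    rw [List.cons_append, stepA_special _ (h d (by simp)) hw, List.map_cons, List.cons_append,
      skip_special hw pre s (fun x hx => h x (by simp [hx]))]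

lemma mem_takeWhile_beq {o : Option String} {d : Char} {l : List Char}
    (hd : d ∈ l.takeWhile (fun x => classifyB x == o)) :
    classifyB d = o := by
  have h2 := List.mem_takeWhile_imp (p := fun x => classifyB x == o) hd
  simpa using h2

lemma loops_eq : ∀ (n : ℕ) (l : List Char), l.length ≤ n → tiLoopA l = tiLoopB l := by
  intro n
  induction n with
  | zero =>
    intro l hl
    rw [List.length_eq_zero_iff.mp (Nat.le_zero.mp hl)]
    simp [tiLoopA, tiLoopB]
  | succ n ih =>
    intro l hl
    match l with
    | [] => simp [tiLoopA, tiLoopB]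
    | c :: rest =>
      have hrest : rest.length ≤ n := by simpa using hl
      rw [tiLoopB]
      rcases hcc : classifyB c with _ | t
      · -- run of unclassified characters: no token
        have hdrop : (rest.dropWhile (fun d => classifyB d == none)).length ≤ n :=
          le_trans (List.length_dropWhile_le _ _) hrest
        rw [stepA_none rest hcc]
        conv_lhs => rw [← List.takeWhile_append_dropWhile
          (p := fun d => classifyB d == (none : Option String)) (l := rest)]
        rw [skip_none _ _ (fun d hd => mem_takeWhile_beq hd)]
        simpa [emitB] using ih _ hdrop
      · by_cases hw : t = "WORD"
        · -- a word run: A's inner while consumed exactly the maximal alpha run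
          subst hw
          have ha : PySem.Chars.isalpha c = true := (classify_word_iff c).mp hcc
          have hpq : (fun d => classifyB d == some "WORD") = PySem.Chars.isalpha :=
            funext word_pred
          simp only [hpq]
          have hdrop : (rest.dropWhile PySem.Chars.isalpha).length ≤ n :=
            le_trans (List.length_dropWhile_le _ _) hrest
          rw [stepA_word rest ha, List.takeWhile_cons_of_pos ha, List.dropWhile_cons_of_pos ha]
          have he : emitB (some "WORD") (c :: rest.takeWhile PySem.Chars.isalpha) =
              [("WORD", String.ofList (c :: rest.takeWhile PySem.Chars.isalpha))] := by
            simp [emitB]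
          rw [he, List.singleton_append]
          exact congrArg _ (ih _ hdrop)
        · -- a run of one special character class: one token per character
          have hdrop : (rest.dropWhile (fun d => classifyB d == some t)).length ≤ n :=
            le_trans (List.length_dropWhile_le _ _) hrest
          rw [stepA_special rest hcc hw]
          conv_lhs => rw [← List.takeWhile_append_dropWhile
            (p := fun d => classifyB d == some t) (l := rest)]
          rw [skip_special hw _ _ (fun d hd => mem_takeWhile_beq hd)]
          have he : emitB (some t) (c :: rest.takeWhile (fun d => classifyB d == some t)) =
              (c :: rest.takeWhile (fun d => classifyB d == some t)).map
                (fun d => (t, String.ofList [d])) := by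
            simp [emitB, hw]
          rw [he, List.map_cons, List.cons_append]
          exact congrArg _ (congrArg _ (ih _ hdrop))

-- ===== VERDICT (by name: the statement is the Claim_ definition above) =====
theorem tokenize_input_spec : Claim_equal_tokenize_input := by
  intro s _
  unfold Spec_tokenize_input tokenize_input tokenize_input_alt
  exact loops_eq _ _ le_rfl
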